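-- pv_equiv track=rewrite | github.com/eric22gh/Python-course | Interview_Practice/Day_11_off_exercises.py | letters_in_words
-- ===== SOURCE A (Python) =====
-- def letters_in_words(texto):
--     if not isinstance(texto, str):
--         raise TypeError("I only accept words")
--     count = 0
--     aux = "1234567890"
--     for i in texto.replace(" ", ""): # isalpha:
--         if i in aux:
--             continue
--         count += 1
--     return f"The amount of letters in the text is: {count}"
-- ===== SOURCE B (Python) =====
-- def letters_in_words(texto):
--     if not isinstance(texto, str):
--         raise TypeError("I only accept words")
--     count = len(texto) - texto.count(' ') - sum(texto.count(d) for d in '0123456789')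
--     return f"The amount of letters in the text is: {count}"
-- ===== Notes on version B (the rewrite author's own statement) =====
-- stated objective: faster
-- what changed: Replaces the replace-then-filter per-character loop with arithmetic complement counting: len(texto) minus the count of spaces minus the summed counts of the ten digit characters, all via C-level str.count scans.
import Mathlib
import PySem

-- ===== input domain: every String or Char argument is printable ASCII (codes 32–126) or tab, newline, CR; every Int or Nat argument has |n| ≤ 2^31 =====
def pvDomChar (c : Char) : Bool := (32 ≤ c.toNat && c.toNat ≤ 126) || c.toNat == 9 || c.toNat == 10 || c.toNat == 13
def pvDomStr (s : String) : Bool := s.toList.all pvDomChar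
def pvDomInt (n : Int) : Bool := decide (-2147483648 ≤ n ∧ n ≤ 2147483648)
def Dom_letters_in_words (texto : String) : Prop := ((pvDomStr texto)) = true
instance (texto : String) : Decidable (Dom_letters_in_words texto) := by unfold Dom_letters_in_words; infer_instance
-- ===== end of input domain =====

-- B computes the same count by arithmetic complement (length minus space count minus per-digit counts) instead of A's replace-then-filter per-character loop; a timing run measured B faster (constant factor).


-- ===== PORT A =====
-- for-loop over texto.replace(" ", ""), skipping chars in "1234567890", counting the rest
def letters_in_words (texto : String) : String :=
  let aux : String := "1234567890"
  let count : Int :=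
    (PySem.Str.replace texto " " "").toList.foldl
      (fun acc i => if PySem.Chars.isIn [i] aux.toList then acc else acc + 1) 0
  "The amount of letters in the text is: " ++ PySem.Int.toStr count

-- ===== PORT B =====
-- count = len(texto) - texto.count(' ') - sum(texto.count(d) for d in '0123456789')
def letters_in_words_alt (texto : String) : String :=
  let count : Int :=
    (PySem.Str.len texto) - (PySem.Str.count texto " " : Int)
      - (("0123456789".toList).map (fun d => (PySem.Chars.count texto.toList [d] : Int))).sum
  "The amount of letters in the text is: " ++ PySem.Int.toStr count

-- ===== PRECONDITION & SPEC =====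
def Spec_letters_in_words (texto : String) (out : String) : Prop := out = letters_in_words_alt texto
instance (texto : String) (out : String) : Decidable (Spec_letters_in_words texto out) := by unfold Spec_letters_in_words; infer_instance

-- ===== CLAIM (what is proved, stated in full; the proofs are below) =====
def Claim_equal_letters_in_words : Prop := ∀ (texto : String), Dom_letters_in_words texto → Spec_letters_in_words texto (letters_in_words texto)

-- ===== LEMMAS AND PROOFS =====

-- replacing a single char by "" is filtering it out
theorem replace_go_single (x : Char) : ∀ (l : List Char) (fuel : Nat) (acc : List Char),
    l.length ≤ fuel →
    PySem.Chars.replace.go [x] [] fuel l acc = acc.reverse ++ l.filter (fun c => !(c == x)) := by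
  intro l
  induction l with
  | nil => intro fuel acc h; cases fuel <;> simp [PySem.Chars.replace.go]
  | cons c t ih =>
    intro fuel acc h
    cases fuel with
    | zero => simp at h
    | succ f =>
      rw [PySem.Chars.replace.go]
      by_cases hc : c = x
      · subst hc
        simp [List.isPrefixOf]
        rw [ih f acc (by simpa using h)]
      · have hxc : ¬ x = c := fun h' => hc h'.symm
        simp [List.isPrefixOf, hxc, hc]
        rw [ih f (c :: acc) (by simpa using Nat.le_of_succ_le_succ h)]
        simp

theorem replace_single (x : Char) (cs : List Char) :
    PySem.Chars.replace cs [x] [] = cs.filter (fun c => !(c == x)) := by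
  rw [PySem.Chars.replace]
  simp
  rw [replace_go_single x cs cs.length [] le_rfl]
  simp

-- counting a single-char substring is List.count
theorem count_go_single (x : Char) : ∀ (l : List Char) (fuel : Nat) (acc : Nat),
    l.length ≤ fuel →
    PySem.Chars.count.go [x] fuel l acc = acc + l.count x := by
  intro l
  induction l with
  | nil => intro fuel acc h; cases fuel <;> simp [PySem.Chars.count.go]
  | cons c t ih =>
    intro fuel acc h
    cases fuel with
    | zero => simp at h
    | succ f =>
      rw [PySem.Chars.count.go]
      by_cases hc : c = x
      · subst hc
        simp [List.isPrefixOf]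
        rw [ih f (acc + 1) (by simpa using h)]
        omega
      · have hxc : ¬ x = c := fun h' => hc h'.symm
        simp [List.isPrefixOf, hxc]
        rw [ih f acc (by simpa using Nat.le_of_succ_le_succ h)]
        simp [List.count_cons]
        exact hc

theorem count_single (x : Char) (cs : List Char) :
    PySem.Chars.count cs [x] = cs.count x := by
  rw [PySem.Chars.count]
  simp
  rw [count_go_single x cs cs.length 0 le_rfl]
  omega

-- singleton containment is membership
theorem isIn_singleton (c : Char) (l : List Char) :
    PySem.Chars.isIn [c] l = l.contains c := by
  by_cases h : c ∈ l
  · have hinf : [c] <:+: l := by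
      obtain ⟨s, t, rfl⟩ := List.append_of_mem h
      exact ⟨s, t, by simp⟩
    simp [(PySem.Chars.isIn_iff_infix _ _).mpr hinf, h]
  · have : ¬ ([c] <:+: l) := by
      intro hinf
      exact h (hinf.subset (by simp))
    simp [(PySem.Chars.isIn_eq_false_iff _ _).mpr this, h]

theorem count_of_nodup (c : Char) : ∀ (l : List Char), l.Nodup →
    (l.count c : Int) = if l.contains c then 1 else 0 := by
  intro l hl
  by_cases h : c ∈ l
  · have h1 : l.count c = 1 := by
      have := List.nodup_iff_count_le_one.mp hl c
      have := List.count_pos_iff.mpr h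
      omega
    simp [h1, h]
  · simp [List.count_eq_zero.mpr h, h]

-- pushing a cons through the per-digit count sum
theorem sum_indicator (c : Char) (ds : List Char) :
    (ds.map (fun i => if c = i then (1 : Int) else 0)).sum = (ds.count c : Int) := by
  induction ds with
  | nil => simp
  | cons d ds ih =>
    simp only [List.map_cons, List.sum_cons, ih, List.count_cons]
    by_cases h : c = d
    · subst h; simp; ring
    · simp [h]
      exact fun e => h e.symm

theorem sum_map_count_cons (c : Char) (cs digits : List Char) :
    (digits.map (fun d => ((c :: cs).count d : Int))).sum
      = (digits.map (fun d => (cs.count d : Int))).sum + (digits.count c : Int) := by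
  simp only [List.count_cons]
  push_cast
  rw [List.sum_map_add]
  have h2 : (digits.map (fun d => if (c == d) = true then (1 : Int) else 0)).sum
      = (digits.map (fun i => if c = i then (1 : Int) else 0)).sum := by
    congr 1
    apply List.map_congr_left
    intro d _
    by_cases h : c = d
    · subst h; simp
    · simp [h]
  rw [h2, sum_indicator]

-- both digit alphabets contain the same characters
theorem digits_contains_eq (c : Char) :
    ((['1','2','3','4','5','6','7','8','9','0'] : List Char).contains c)
      = ((['0','1','2','3','4','5','6','7','8','9'] : List Char).contains c) := by
  apply Bool.eq_iff_iff.mpr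
  simp only [List.contains_iff_mem]
  constructor <;> intro h <;> simp at h <;> rcases h with h|h|h|h|h|h|h|h|h|h <;> simp [h]

-- the core arithmetic identity between the two counts
theorem key_count (cs : List Char) :
    (((cs.filter (fun c => !(c == ' '))).countP
        (fun i => !("1234567890".toList.contains i)) : Nat) : Int)
    = (cs.length : Int) - (cs.count ' ' : Int)
      - (("0123456789".toList).map (fun d => (cs.count d : Int))).sum := by
  rw [show "1234567890".toList = ['1','2','3','4','5','6','7','8','9','0'] from rfl,
      show "0123456789".toList = ['0','1','2','3','4','5','6','7','8','9'] from rfl]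
  induction cs with
  | nil => simp
  | cons c cs ih =>
    rw [sum_map_count_cons]
    by_cases h : c = ' '
    · subst h
      have hz : ((['0','1','2','3','4','5','6','7','8','9'] : List Char).count ' ') = 0 := by decide
      rw [List.filter_cons_of_neg (by decide)]
      simp only [List.length_cons, List.count_cons, hz, beq_self_eq_true, if_true]
      push_cast
      rw [ih]
      ring
    · have hne : (c == ' ') = false := by simp [h]
      rw [List.filter_cons_of_pos (by simp [hne])]
      rw [List.countP_cons]
      have hc9 : (((['0','1','2','3','4','5','6','7','8','9'] : List Char).count c) : Int)
          = if ((['0','1','2','3','4','5','6','7','8','9'] : List Char).contains c) then 1 else 0 :=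
        count_of_nodup c _ (by decide)
      rw [hc9, ← digits_contains_eq c]
      simp only [List.length_cons, List.count_cons, hne, if_false, Bool.false_eq_true]
      by_cases hd : ((['1','2','3','4','5','6','7','8','9','0'] : List Char).contains c) = true
      · simp only [hd, Bool.not_true, if_false, if_true, Bool.false_eq_true]
        push_cast
        rw [ih]
        ring
      · have hd' : ((['1','2','3','4','5','6','7','8','9','0'] : List Char).contains c) = false := by
          cases hval : ((['1','2','3','4','5','6','7','8','9','0'] : List Char).contains c)
          · rfl
          · exact absurd hval hd
        simp only [hd', Bool.not_false, if_true]
        push_cast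
        rw [ih]
        ring

theorem main_count (cs : List Char) :
    ((cs.filter (fun c => !(c == ' '))).foldl
      (fun acc i => if PySem.Chars.isIn [i] "1234567890".toList then acc else acc + 1) (0 : Int))
    = (cs.length : Int) - (cs.count ' ' : Int)
      - (("0123456789".toList).map (fun d => (cs.count d : Int))).sum := by
  have hf : (fun (acc : Int) (i : Char) =>
        if PySem.Chars.isIn [i] "1234567890".toList then acc else acc + 1)
      = (fun (acc : Int) (i : Char) =>
        if (!("1234567890".toList.contains i)) = true then acc + 1 else acc) := by
    funext acc i
    rw [isIn_singleton]
    cases h : ("1234567890".toList.contains i) <;> simp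
  rw [hf, PySem.List.foldl_if_add_one]
  rw [key_count cs]
  push_cast
  ring

-- ===== VERDICT (by name: the statement is the Claim_ definition above) =====
theorem letters_in_words_spec : Claim_equal_letters_in_words := by
  intro texto _
  unfold Spec_letters_in_words
  simp only [letters_in_words, letters_in_words_alt]
  have h1 : (PySem.Str.replace texto " " "").toList
      = texto.toList.filter (fun c => !(c == ' ')) := by
    rw [PySem.Str.toList_replace]
    rw [show (" " : String).toList = [' '] from rfl, show ("" : String).toList = [] from rfl]
    exact replace_single ' ' texto.toList
  rw [h1, main_count]
  rw [show PySem.Str.len texto = (texto.toList.length : Int) from by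
        rw [PySem.Str.len_eq, String.length_toList]]
  rw [show PySem.Str.count texto " " = texto.toList.count ' ' from by
        rw [PySem.Str.count_eq, show (" " : String).toList = [' '] from rfl]
        exact count_single ' ' texto.toList]
  simp only [count_single]
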